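-- pv_equiv track=rewrite | github.com/nickwilmes/AOC | 2023/day3.py | get_left_num
-- ===== SOURCE A (Python) =====
-- def get_left_num(line: str, x: int) -> str:
--     num = ""
--     if x == 0:
--         return num
--
--     for i in range(x - 1, -1, -1):
--         if line[i].isdigit():
--             num = line[i] + num
--         else:
--             break
--
--     return num
-- ===== SOURCE B (Python) =====
-- def get_left_num(line: str, x: int) -> str:
--     # Forward single pass over line[0:x], maintaining the current contiguous
--     # digit run; the run held after the pass is the one ending just before x.
--     run = ""
--     for j in range(x):
--         c = line[j]
--         run = run + c if c.isdigit() else ""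
--     return run
-- ===== Notes on version B (the rewrite author's own statement) =====
-- stated objective: alternative
-- what changed: Replaces the backward index walk that prepends digits to an accumulator and breaks at the first non-digit with a single forward pass over line[0:x] that maintains the current contiguous digit run (resetting it on non-digits) and returns the run held at the end.
import Mathlib
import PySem

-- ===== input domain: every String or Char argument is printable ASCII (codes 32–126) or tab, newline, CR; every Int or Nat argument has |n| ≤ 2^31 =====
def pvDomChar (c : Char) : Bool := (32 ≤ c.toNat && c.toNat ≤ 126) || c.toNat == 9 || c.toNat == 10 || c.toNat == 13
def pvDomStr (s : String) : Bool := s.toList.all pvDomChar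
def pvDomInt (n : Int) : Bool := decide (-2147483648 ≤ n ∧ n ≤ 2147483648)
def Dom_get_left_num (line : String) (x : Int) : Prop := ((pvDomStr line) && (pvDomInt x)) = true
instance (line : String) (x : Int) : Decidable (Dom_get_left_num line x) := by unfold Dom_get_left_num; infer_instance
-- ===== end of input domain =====

-- B replaces A's backward index walk (prepend digits, break at first non-digit) with a
-- single forward pass over line[0:x] that maintains the current contiguous digit run.

-- ===== PORT A =====
-- the 'for i in range(x-1,-1,-1)' body: prepend while digit, break otherwise
def getLeftLoopA (L : List Char) (idxs : List Int) (num : List Char) : List Char :=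
  match idxs with
  | [] => num
  | i :: rest =>
    match PySem.List.pyGet? L i with
    | none => num  -- Python raises IndexError here; such inputs are excluded by Pre_
    | some c => if PySem.Chars.isdigit c then getLeftLoopA L rest (c :: num) else num

def get_left_num (line : String) (x : Int) : String :=
  if x = 0 then String.ofList []
  else String.ofList (getLeftLoopA line.toList (PySem.List.pyRange (x - 1) (-1) (-1)) [])

-- ===== PORT B =====
-- for j in range(x): c = line[j]; run = run + c if c.isdigit() else ""
def get_left_num_alt (line : String) (x : Int) : String :=
  String.ofList ((PySem.List.pyRange 0 x 1).foldl
    (fun run j =>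
      match PySem.List.pyGet? line.toList j with
      | none => run  -- Python raises IndexError here; such inputs are excluded by Pre_
      | some c => if PySem.Chars.isdigit c then run ++ [c] else []) [])

-- ===== PRECONDITION & SPEC =====
-- A raises IndexError exactly when x > len(line); Pre_ excludes only those inputs.
def Pre_get_left_num (line : String) (x : Int) : Prop := x ≤ (line.toList.length : Int)
instance (line : String) (x : Int) : Decidable (Pre_get_left_num line x) := by unfold Pre_get_left_num; infer_instance
def pvWitness_get_left_num : String × Int := ("a12", 3)

def Spec_get_left_num (line : String) (x : Int) (out : String) : Prop := out = get_left_num_alt line x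
instance (line : String) (x : Int) (out : String) : Decidable (Spec_get_left_num line x out) := by unfold Spec_get_left_num; infer_instance

-- ===== CLAIM (what is proved, stated in full; the proofs are below) =====
def Claim_equal_get_left_num : Prop := ∀ (line : String) (x : Int), Dom_get_left_num line x → Pre_get_left_num line x → Spec_get_left_num line x (get_left_num line x)

-- ===== LEMMAS AND PROOFS =====

-- A's loop, reduced to the visited characters: it builds the reversed leading digit run
-- of the visit order (which is P.reverse), prepended to the accumulator.
lemma loopA_eq (L : List Char) (idxs : List Int) (cs num : List Char)
    (h : idxs.map (fun i => PySem.List.pyGet? L i) = cs.map some) :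
    getLeftLoopA L idxs num = (cs.takeWhile PySem.Chars.isdigit).reverse ++ num := by
  induction idxs generalizing cs num with
  | nil =>
    have : cs = [] := by cases cs <;> simp_all
    simp [this, getLeftLoopA]
  | cons i rest ih =>
    cases cs with
    | nil => simp at h
    | cons c cs' =>
      simp only [List.map_cons, List.cons.injEq] at h
      obtain ⟨h1, h2⟩ := h
      simp only [getLeftLoopA, h1]
      by_cases hd : PySem.Chars.isdigit c
      · simp [hd, ih cs' (c :: num) h2]
      · simp [hd]

-- B's loop, reduced to the visited characters (all lookups succeed).
lemma loopB_eq (L : List Char) (idxs : List Int) (cs run : List Char)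
    (h : idxs.map (fun i => PySem.List.pyGet? L i) = cs.map some) :
    idxs.foldl (fun run j =>
        match PySem.List.pyGet? L j with
        | none => run
        | some c => if PySem.Chars.isdigit c then run ++ [c] else []) run
    = cs.foldl (fun run c => if PySem.Chars.isdigit c then run ++ [c] else []) run := by
  induction idxs generalizing cs run with
  | nil =>
    have : cs = [] := by cases cs <;> simp_all
    simp [this]
  | cons i rest ih =>
    cases cs with
    | nil => simp at h
    | cons c cs' =>
      simp only [List.map_cons, List.cons.injEq] at h
      obtain ⟨h1, h2⟩ := h
      simp only [List.foldl_cons, h1]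
      exact ih cs' _ h2

-- closed form of B's run-maintaining fold: the trailing digit run of cs
lemma foldB_closed (cs run : List Char) :
    cs.foldl (fun run c => if PySem.Chars.isdigit c then run ++ [c] else []) run
    = if cs.all PySem.Chars.isdigit then run ++ cs
      else (cs.reverse.takeWhile PySem.Chars.isdigit).reverse := by
  induction cs using List.reverseRecOn generalizing run with
  | nil => simp
  | append_singleton cs c ih =>
    rw [List.foldl_append]
    by_cases hd : PySem.Chars.isdigit c
    · simp only [List.foldl_cons, List.foldl_nil, hd, if_pos]
      rw [ih]
      by_cases hall : cs.all PySem.Chars.isdigit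
      · simp [hall, hd]
      · simp [hall, hd]
    · simp [hd]

lemma pyRange_desc (x : Int) (hx : 0 < x) :
    PySem.List.pyRange (x - 1) (-1) (-1)
    = (List.range x.toNat).map (fun (n : Nat) => x - 1 + -(n : Int)) := by
  simp only [PySem.List.pyRange]
  rw [if_neg (by norm_num), if_neg (by norm_num), if_pos (by omega)]
  have h : x - 1 - -1 + - -1 - 1 = x := by ring
  rw [h]
  norm_num

lemma pyRange_desc_empty (x : Int) (hx : x ≤ 0) :
    PySem.List.pyRange (x - 1) (-1) (-1) = [] := by
  simp only [PySem.List.pyRange]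
  rw [if_neg (by norm_num), if_neg (by norm_num), if_neg (by omega)]
  simp

lemma pyRange_fwd_empty (x : Int) (hx : x ≤ 0) :
    PySem.List.pyRange 0 x 1 = [] := by
  simp only [PySem.List.pyRange]
  rw [if_neg (by norm_num), if_pos (by norm_num), if_neg (by omega)]
  simp

lemma mapGet_forward (L : List Char) (k : Nat) (hk : k ≤ L.length) :
    ((List.range k).map (fun (n : Nat) => (n : Int))).map (fun i => PySem.List.pyGet? L i)
    = (L.take k).map some := by
  rw [List.map_map]
  have h : ∀ n ∈ List.range k, ((fun i => PySem.List.pyGet? L i) ∘ (fun (n : Nat) => (n:Int))) n = L[n]? := by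
    intro n _
    exact PySem.List.pyGet?_natCast L n
  rw [List.map_congr_left h]
  apply List.ext_getElem
  · simp [hk]
  · intro n h1 h2
    simp only [List.length_map, List.length_range] at h1
    have hn : n < L.length := lt_of_lt_of_le h1 hk
    simp [hn, List.getElem_take]

lemma mapGet_backward (L : List Char) (k : Nat) (hk : k ≤ L.length) :
    ((List.range k).map (fun (n : Nat) => ((k:Int)) - 1 + -(n : Int))).map (fun i => PySem.List.pyGet? L i)
    = (L.take k).reverse.map some := by
  rw [List.map_map]
  have h : ∀ n ∈ List.range k, ((fun i => PySem.List.pyGet? L i) ∘ (fun (n : Nat) => (k:Int) - 1 + -(n:Int))) n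
      = L[k - 1 - n]? := by
    intro n hn
    simp only [List.mem_range] at hn
    have he : ((k:Int)) - 1 + -(n:Int) = ((k - 1 - n : Nat) : Int) := by omega
    simp only [Function.comp_apply, he]
    exact PySem.List.pyGet?_natCast L _
  rw [List.map_congr_left h]
  apply List.ext_getElem
  · simp [hk]
  · intro n h1 h2
    simp only [List.length_map, List.length_range] at h1
    have hn : k - 1 - n < L.length := by omega
    simp only [List.getElem_map, List.getElem_range, List.getElem_reverse,
      List.getElem?_eq_getElem, hn]
    rw [List.getElem_take]
    congr 1
    simp only [List.length_take, Nat.min_eq_left hk]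

-- ===== VERDICT (by name: the statement is the Claim_ definition above) =====
theorem get_left_num_spec : Claim_equal_get_left_num := by
  intro line x _ hpre
  unfold Spec_get_left_num get_left_num get_left_num_alt
  unfold Pre_get_left_num at hpre
  by_cases hx : 0 < x
  case neg =>
    -- x ≤ 0: both loops run over the empty range
    have hle : x ≤ 0 := by omega
    rw [pyRange_fwd_empty x hle]
    by_cases h0 : x = 0
    · simp [h0]
    · rw [if_neg h0, pyRange_desc_empty x hle]
      simp [getLeftLoopA]
  case pos =>
    set L := line.toList with hL
    set k := x.toNat with hk
    have hxk : (k : Int) = x := Int.toNat_of_nonneg (by omega)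
    have hkle : k ≤ L.length := by omega
    set P := L.take k with hP
    rw [if_neg (by omega)]
    -- A side
    have hA : getLeftLoopA L (PySem.List.pyRange (x - 1) (-1) (-1)) []
        = (P.reverse.takeWhile PySem.Chars.isdigit).reverse := by
      rw [pyRange_desc x hx]
      have := mapGet_backward L k hkle
      rw [hxk] at this
      rw [loopA_eq L _ P.reverse [] this]
      simp
    -- B side
    have hB : (PySem.List.pyRange 0 x 1).foldl
        (fun run j =>
          match PySem.List.pyGet? L j with
          | none => run
          | some c => if PySem.Chars.isdigit c then run ++ [c] else []) []
        = if P.all PySem.Chars.isdigit then P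
          else (P.reverse.takeWhile PySem.Chars.isdigit).reverse := by
      rw [← hxk, PySem.List.pyRange_zero_natCast k]
      rw [loopB_eq L _ P [] (mapGet_forward L k hkle)]
      rw [foldB_closed]
      simp
    rw [hA, hB]
    by_cases hall : P.all PySem.Chars.isdigit
    · rw [if_pos hall]
      have : P.reverse.takeWhile PySem.Chars.isdigit = P.reverse := by
        rw [List.takeWhile_eq_self_iff]
        intro c hc
        exact (List.all_eq_true.mp hall) c (List.mem_reverse.mp hc)
      rw [this, List.reverse_reverse]
    · rw [if_neg hall]
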